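-- pv_equiv track=rewrite | github.com/mun5424/starforge-prep | quickselect.py | firstSmallestPositiveInt
-- ===== SOURCE A (Python) =====
-- from collections import defaultdict
--
-- def firstSmallestPositiveInt(nums):
--     # first approach - use a HashSet
--     if not nums:
--         return None
--
--     # add every count of element to the hashSet
--     hashSet = defaultdict(int)
--     for n in nums:
--         hashSet[n]+= 1
--
--     # from the minimum value, do +1 until we find the missing first positive
--
--     currentVal = min(hashSet.keys())
--     while True:
--         currentVal += 1
--         if currentVal not in hashSet:
--             return currentVal
-- ===== SOURCE B (Python) =====
-- def firstSmallestPositiveInt(nums):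
--     if not nums:
--         return None
--     vals = sorted(set(nums))
--     expected = vals[0] + 1
--     for v in vals:
--         if v == expected:
--             expected += 1
--         elif v > expected:
--             return expected
--     return expected
-- ===== Notes on version B (the rewrite author's own statement) =====
-- stated objective: alternative
-- what changed: Replaces the hash-counter plus unbounded upward membership probing with a single sort of the distinct values and one ordered scan for the first gap above the minimum.
import Mathlib
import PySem

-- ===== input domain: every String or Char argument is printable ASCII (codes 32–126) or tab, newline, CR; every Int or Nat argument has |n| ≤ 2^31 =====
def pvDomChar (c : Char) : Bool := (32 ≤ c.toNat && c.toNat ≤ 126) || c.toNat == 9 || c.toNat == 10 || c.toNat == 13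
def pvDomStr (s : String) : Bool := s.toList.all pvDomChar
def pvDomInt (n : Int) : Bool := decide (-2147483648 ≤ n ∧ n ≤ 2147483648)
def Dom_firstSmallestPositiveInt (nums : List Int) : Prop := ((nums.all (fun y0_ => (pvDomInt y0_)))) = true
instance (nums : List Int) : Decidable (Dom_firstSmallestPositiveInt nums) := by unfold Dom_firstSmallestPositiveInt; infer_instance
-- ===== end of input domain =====

-- B replaces A's hash-counter + unbounded upward membership probing by sorting the
-- distinct values once and scanning for the first gap above the minimum (alternative algorithm).

-- ===== PORT A =====
-- the 'while True' probe; fuel is only a totality guard (#keys + 1 always suffices, proved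
-- below); each step is exactly Python's 'currentVal += 1; if currentVal not in hashSet: return'
def pvProbeA (d : PySem.Dict Int Int) : Nat → Int → Int
  | 0, cur => cur + 1
  | fuel + 1, cur =>
      let c := cur + 1
      if d.contains c then pvProbeA d fuel c else c

def firstSmallestPositiveInt (nums : List Int) : Option Int :=
  if nums = [] then none
  else
    -- hashSet = defaultdict(int); for n in nums: hashSet[n] += 1
    let hashSet : PySem.Dict Int Int :=
      nums.foldl (fun d n => d.modify n 0 (· + 1)) PySem.Dict.empty
    -- currentVal = min(hashSet.keys())  (keys nonempty since nums ≠ [])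
    match PySem.List.min? hashSet.keys (fun x => x) with
    | none => none
    | some m => some (pvProbeA hashSet (hashSet.keys.length + 1) m)

-- ===== PORT B =====
-- the for-loop of Source B: advance 'expected' past each matching value, stop at the first gap
def pvScanB : Int → List Int → Int
  | e, [] => e
  | e, v :: vs => if v = e then pvScanB (e + 1) vs else if e < v then e else pvScanB e vs

def firstSmallestPositiveInt_alt (nums : List Int) : Option Int :=
  if nums = [] then none
  else
    -- vals = sorted(set(nums)); expected = vals[0] + 1; scan
    match PySem.List.sorted (PySem.Set.ofList nums) (fun x => x) false with
    | [] => none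
    | m :: t => some (pvScanB (m + 1) (m :: t))

-- ===== PRECONDITION & SPEC =====
def Spec_firstSmallestPositiveInt (nums : List Int) (out : Option Int) : Prop := out = firstSmallestPositiveInt_alt nums
instance (nums : List Int) (out : Option Int) : Decidable (Spec_firstSmallestPositiveInt nums out) := by unfold Spec_firstSmallestPositiveInt; infer_instance

-- ===== CLAIM (what is proved, stated in full; the proofs are below) =====
def Claim_equal_firstSmallestPositiveInt : Prop := ∀ (nums : List Int), Dom_firstSmallestPositiveInt nums → Spec_firstSmallestPositiveInt nums (firstSmallestPositiveInt nums)

-- ===== LEMMAS AND PROOFS =====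

-- both programs compute the unique r with: cur < r, r ∉ nums, and every value strictly
-- between cur and r occurs in nums
def pvGap (nums : List Int) (cur r : Int) : Prop :=
  cur < r ∧ r ∉ nums ∧ ∀ y, cur < y → y < r → y ∈ nums

theorem pvGap_unique {nums : List Int} {cur r1 r2 : Int}
    (h1 : pvGap nums cur r1) (h2 : pvGap nums cur r2) : r1 = r2 := by
  obtain ⟨a1, b1, c1⟩ := h1
  obtain ⟨a2, b2, c2⟩ := h2
  by_contra hne
  rcases lt_or_gt_of_ne hne with h | h
  · exact b1 (c2 r1 a1 h)
  · exact b2 (c1 r2 a2 h)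

theorem pvFilter_mono (K : List Int) (cur c : Int) (hcc : c = cur + 1) :
    (K.filter (fun x => decide (c < x))).length ≤
    (K.filter (fun x => decide (cur < x))).length := by
  induction K with
  | nil => simp
  | cons k tl ih =>
    rw [List.filter_cons, List.filter_cons]
    by_cases h : c < k
    · have h2 : cur < k := by omega
      simp [h, h2]; omega
    · by_cases h2 : cur < k <;> simp [h, h2] <;> omega

theorem pvCnt_step (K : List Int) (cur c : Int) (hcc : c = cur + 1) (hc : c ∈ K) :
    (K.filter (fun x => decide (c < x))).length <
    (K.filter (fun x => decide (cur < x))).length := by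
  induction K with
  | nil => simp at hc
  | cons k tl ih =>
    rw [List.filter_cons, List.filter_cons]
    rcases List.mem_cons.mp hc with rfl | hmem
    · have h2 : cur < c := by omega
      have := pvFilter_mono tl cur c hcc
      simp [h2]; omega
    · have := ih hmem
      by_cases h : c < k
      · have h2 : cur < k := by omega
        simp [h, h2]; omega
      · by_cases h2 : cur < k <;> simp [h, h2] <;> omega

theorem pvProbeA_spec (nums : List Int) :
    ∀ (fuel : Nat) (cur : Int),
      ((PySem.Set.ofList nums).filter (fun x => decide (cur < x))).length < fuel →
      pvGap nums cur (pvProbeA (PySem.Dict.counter nums) fuel cur) := by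
  intro fuel
  induction fuel with
  | zero => intro cur h; omega
  | succ f ih =>
    intro cur h
    simp only [pvProbeA, PySem.Dict.contains_counter, List.contains_eq_mem]
    by_cases hc : cur + 1 ∈ nums
    · rw [if_pos (by simp [hc])]
      have hmem : cur + 1 ∈ PySem.Set.ofList nums := by
        simpa [PySem.Set.mem_ofList] using hc
      have hlt := pvCnt_step (PySem.Set.ofList nums) cur (cur + 1) rfl hmem
      obtain ⟨a, b, c⟩ := ih (cur + 1) (by omega)
      exact ⟨by omega, b, fun y hy1 hy2 => by
        rcases eq_or_lt_of_le (by omega : cur + 1 ≤ y) with rfl | hlt2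
        · exact hc
        · exact c y hlt2 hy2⟩
    · rw [if_neg (by simp [hc])]
      exact ⟨by omega, hc, fun y hy1 hy2 => by omega⟩

theorem pvScanB_spec :
    ∀ (l : List Int) (e : Int), l.Pairwise (· < ·) →
      e ≤ pvScanB e l ∧ pvScanB e l ∉ l ∧ ∀ y, e ≤ y → y < pvScanB e l → y ∈ l := by
  intro l
  induction l with
  | nil => intro e _; exact ⟨le_refl _, by simp [pvScanB], fun y h1 h2 => by simp [pvScanB] at h2; omega⟩
  | cons v vs ih =>
    intro e hp
    have hp' : vs.Pairwise (· < ·) := hp.tail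
    have hv : ∀ x ∈ vs, v < x := fun x hx => List.rel_of_pairwise_cons hp hx
    rw [pvScanB]
    split_ifs with h1 h2
    · subst h1
      obtain ⟨a, b, c⟩ := ih (v + 1) hp'
      refine ⟨by omega, ?_, ?_⟩
      · intro hmem
        rcases List.mem_cons.mp hmem with heq | hmem'
        · omega
        · exact b hmem'
      · intro y hy1 hy2
        rcases eq_or_lt_of_le hy1 with rfl | hlt
        · exact List.mem_cons_self
        · exact List.mem_cons_of_mem _ (c y (by omega) hy2)
    · refine ⟨le_refl _, ?_, fun y hy1 hy2 => by omega⟩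
      intro hmem
      rcases List.mem_cons.mp hmem with heq | hmem'
      · omega
      · exact absurd (hv e hmem') (by omega)
    · have hve : v < e := by omega
      obtain ⟨a, b, c⟩ := ih e hp'
      refine ⟨a, ?_, fun y hy1 hy2 => List.mem_cons_of_mem _ (c y hy1 hy2)⟩
      intro hmem
      rcases List.mem_cons.mp hmem with heq | hmem'
      · omega
      · exact b hmem'

-- B's scan result, read as a pvGap fact about nums
theorem pvScanB_gap (nums : List Int) {m : Int} {t : List Int}
    (hvals : PySem.List.sorted (PySem.Set.ofList nums) (fun x => x) false = m :: t) :
    pvGap nums m (pvScanB (m + 1) (m :: t)) := by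
  have hp : (m :: t).Pairwise (· < ·) := by
    have := PySem.List.sorted_ofList_pairwise_lt nums
    rwa [hvals] at this
  have hiff : ∀ z : Int, z ∈ m :: t ↔ z ∈ nums := by
    intro z
    rw [← hvals, PySem.List.mem_sorted, PySem.Set.mem_ofList]
  obtain ⟨a, b, c⟩ := pvScanB_spec (m :: t) (m + 1) hp
  refine ⟨by omega, ?_, ?_⟩
  · intro hmem
    exact b ((hiff _).mpr hmem)
  · intro y hy1 hy2
    exact (hiff y).mp (c y (by omega) hy2)

-- ===== VERDICT (by name: the statement is the Claim_ definition above) =====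
theorem firstSmallestPositiveInt_spec : Claim_equal_firstSmallestPositiveInt := by
  intro nums _
  unfold Spec_firstSmallestPositiveInt firstSmallestPositiveInt firstSmallestPositiveInt_alt
  by_cases hnil : nums = []
  · simp [hnil]
  · simp only [if_neg hnil, ← PySem.Dict.counter_eq_foldl, PySem.Dict.keys_counter]
    -- the sorted distinct values are nonempty
    rcases hvals : PySem.List.sorted (PySem.Set.ofList nums) (fun x => x) false with _ | ⟨m', t⟩
    · exfalso
      rw [PySem.List.sorted_eq_nil_iff] at hvals
      rcases List.exists_mem_of_ne_nil nums hnil with ⟨x, hx⟩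
      have : x ∈ PySem.Set.ofList nums := (PySem.Set.mem_ofList nums x).mpr hx
      simp [hvals] at this
    · -- min(keys) is some m
      rcases hmin : PySem.List.min? (PySem.Set.ofList nums) (fun x => x) with _ | m
      · exfalso
        rw [PySem.List.min?_eq_none_iff] at hmin
        rcases List.exists_mem_of_ne_nil nums hnil with ⟨x, hx⟩
        have : x ∈ PySem.Set.ofList nums := (PySem.Set.mem_ofList nums x).mpr hx
        simp [hmin] at this
      · -- m = m' : both are the minimum of the distinct values
        have hm_mem : m ∈ PySem.Set.ofList nums := PySem.List.min?_mem hmin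
        have hm_min : ∀ y ∈ PySem.Set.ofList nums, m ≤ y := PySem.List.min?_isMin hmin
        have hm'_mem : m' ∈ PySem.Set.ofList nums := by
          have : m' ∈ PySem.List.sorted (PySem.Set.ofList nums) (fun x => x) false := by
            rw [hvals]; exact List.mem_cons_self
          rwa [PySem.List.mem_sorted] at this
        have hm'_min : ∀ y ∈ PySem.Set.ofList nums, m' ≤ y :=
          PySem.List.key_head_sorted_le (PySem.Set.ofList nums) (fun x => x) hvals
        have hmm : m = m' := le_antisymm (hm_min m' hm'_mem) (hm'_min m hm_mem)
        subst hmm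
        -- both branches return 'some' of a pvGap witness above m
        have hA : pvGap nums m
            (pvProbeA (PySem.Dict.counter nums) ((PySem.Set.ofList nums).length + 1) m) :=
          pvProbeA_spec nums _ m (by
            have := List.length_filter_le (fun x => decide (m < x)) (PySem.Set.ofList nums)
            omega)
        have hB : pvGap nums m (pvScanB (m + 1) (m :: t)) := pvScanB_gap nums hvals
        exact congrArg some (pvGap_unique hA hB)
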